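-- pv_equiv track=rewrite | github.com/yarikoptic/20260408-noversionid | annex_s3_fixer.py | group_annex_keys
-- ===== SOURCE A (Python) =====
-- from collections import defaultdict
--
-- def key_stem(annex_path: str) -> str:
--     """Get the stem (path without .log/.log.rmet/.log.web suffix).
--
--     Used for grouping related files.
--     """
--     for suffix in (".log.rmet", ".log.web", ".log.cnk", ".log"):
--         if annex_path.endswith(suffix):
--             return annex_path[: -len(suffix)]
--     return annex_path
--
-- def group_annex_keys(entries: list[dict]) -> dict[str, dict[str, str]]:
--     """Group git-annex branch entries by key stem.
--
--     Returns {stem: {suffix: path, ...}} where suffix is 'log', 'rmet', 'web', etc.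
--     Top-level files (remote.log, uuid.log, etc.) are excluded.
--     """
--     groups: dict[str, dict[str, str]] = defaultdict(dict)
--     for entry in entries:
--         path = entry["path"]
--         # Skip top-level files (no directory component with key hash structure)
--         if "/" not in path:
--             continue
--         stem = key_stem(path)
--         if path.endswith(".log.rmet"):
--             groups[stem]["rmet"] = path
--         elif path.endswith(".log.web"):
--             groups[stem]["web"] = path
--         elif path.endswith(".log.cnk"):
--             groups[stem]["cnk"] = path
--         elif path.endswith(".log"):
--             groups[stem]["log"] = path
--         else:
--             groups[stem]["other"] = path
--     return dict(groups)
-- ===== SOURCE B (Python) =====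
-- _LABELS = {".log.rmet": "rmet", ".log.web": "web", ".log.cnk": "cnk", ".log": "log"}
--
-- def _classify(path):
--     """Split path into (stem, label) by slicing off a fixed-width tail and
--     looking it up in the suffix table (tail widths 9, 8, 4)."""
--     for n in (9, 8, 4):
--         label = _LABELS.get(path[-n:])
--         if label is not None:
--             return path[:-n], label
--     return path, "other"
--
-- def group_annex_keys(entries: list[dict]) -> dict[str, dict[str, str]]:
--     """Group git-annex branch entries by key stem, in staged passes:
--     classify once, collect stem order, then build each group by filtering."""
--     triples = [_classify(e["path"]) + (e["path"],) for e in entries if "/" in e["path"]]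
--     order = dict.fromkeys(s for s, _, _ in triples)
--     return {s: {l: p for s2, l, p in triples if s2 == s} for s in order}
-- ===== Notes on version B (the rewrite author's own statement) =====
-- stated objective: alternative
-- what changed: replaces A's single accumulating pass into a defaultdict of dicts (with a key_stem helper plus a separate endswith if-elif ladder per entry) by staged passes: classify each path once via a dict lookup on a fixed-width tail slice, collect the stem order with dict.fromkeys, then build each group's inner dict by filtering the classified triples per stem
import Mathlib
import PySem

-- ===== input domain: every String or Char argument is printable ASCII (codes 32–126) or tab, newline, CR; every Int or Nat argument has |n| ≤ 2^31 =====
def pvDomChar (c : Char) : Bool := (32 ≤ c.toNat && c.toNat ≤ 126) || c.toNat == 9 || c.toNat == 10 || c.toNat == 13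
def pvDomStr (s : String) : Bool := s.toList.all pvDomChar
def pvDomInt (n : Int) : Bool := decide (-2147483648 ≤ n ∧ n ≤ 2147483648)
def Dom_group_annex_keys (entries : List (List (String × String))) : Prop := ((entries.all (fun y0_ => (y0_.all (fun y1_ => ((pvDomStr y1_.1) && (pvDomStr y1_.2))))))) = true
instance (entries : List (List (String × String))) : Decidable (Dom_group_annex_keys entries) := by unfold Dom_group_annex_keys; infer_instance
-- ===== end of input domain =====

-- B regroups in staged passes (classify each path once by a table lookup on a fixed-width tail slice, collect the stem order, then build each group by filtering) instead of A's single accumulating pass into a defaultdict of dicts.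

-- ===== PORT A =====
-- key_stem: loop over the suffix tuple, return path[:-len(suffix)] at the first match
def keyStemGo : List String → String → String
  | [], p => p
  | s :: rest, p =>
    if PySem.Str.endswith p s then PySem.Str.slice p none (some (-(PySem.Str.len s : Int)))
    else keyStemGo rest p

def key_stem (p : String) : String :=
  keyStemGo [".log.rmet", ".log.web", ".log.cnk", ".log"] p

def group_annex_keys (entries : List (List (String × String))) : List (String × List (String × String)) :=
  let groups : PySem.Dict String (PySem.Dict String String) :=
    entries.foldl (fun g entry =>
      match (PySem.Dict.mk entry).get? "path" with
      | none => g            -- KeyError in Python; excluded by Pre_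
      | some path =>
        if PySem.Str.isIn "/" path then
          let stem := key_stem path
          -- defaultdict: groups[stem] is the existing inner dict or a fresh {}
          let inner := g.getD stem PySem.Dict.empty
          if PySem.Str.endswith path ".log.rmet" then g.insert stem (inner.insert "rmet" path)
          else if PySem.Str.endswith path ".log.web" then g.insert stem (inner.insert "web" path)
          else if PySem.Str.endswith path ".log.cnk" then g.insert stem (inner.insert "cnk" path)
          else if PySem.Str.endswith path ".log" then g.insert stem (inner.insert "log" path)
          else g.insert stem (inner.insert "other" path)
        else g) PySem.Dict.empty
  groups.items.map (fun kv => (kv.1, kv.2.items))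

-- ===== PORT B =====
-- _LABELS: the suffix → label table
def pvLabels : PySem.Dict String String :=
  PySem.Dict.mk [(".log.rmet", "rmet"), (".log.web", "web"), (".log.cnk", "cnk"), (".log", "log")]

-- for n in (9, 8, 4): label = _LABELS.get(path[-n:]); if label is not None: return path[:-n], label
def classifyGo : List Nat → String → String × String
  | [], p => (p, "other")
  | n :: rest, p =>
    match pvLabels.get? (PySem.Str.slice p (some (-(n : Int))) none) with
    | some label => (PySem.Str.slice p none (some (-(n : Int))), label)
    | none => classifyGo rest p

def pvClassify (p : String) : String × String := classifyGo [9, 8, 4] p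

def group_annex_keys_alt (entries : List (List (String × String))) : List (String × List (String × String)) :=
  -- triples = [_classify(e["path"]) + (e["path"],) for e in entries if "/" in e["path"]]
  let triples : List (String × String × String) := entries.filterMap (fun e =>
    match (PySem.Dict.mk e).get? "path" with
    | none => none           -- KeyError in Python; excluded by Pre_
    | some path =>
      if PySem.Str.isIn "/" path then
        some ((pvClassify path).1, (pvClassify path).2, path)
      else none)
  -- order = dict.fromkeys(s for s, _, _ in triples)
  let order := PySem.List.dedup (triples.map (·.1))
  -- {s: {l: p for s2, l, p in triples if s2 == s} for s in order}
  ((order.foldl (fun d s =>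
      d.insert s ((triples.filter (fun t => t.1 == s)).foldl
        (fun (inner : PySem.Dict String String) t => inner.insert t.2.1 t.2.2) PySem.Dict.empty))
    (PySem.Dict.empty : PySem.Dict String (PySem.Dict String String))).items).map
    (fun kv => (kv.1, kv.2.items))

-- ===== PRECONDITION & SPEC =====
-- Pre_ excludes exactly the inputs where Python A raises KeyError: an entry without a "path" key.
def Pre_group_annex_keys (entries : List (List (String × String))) : Prop :=
  (entries.all (fun e => (PySem.Dict.mk e).contains "path")) = true
instance (entries : List (List (String × String))) : Decidable (Pre_group_annex_keys entries) := by
  unfold Pre_group_annex_keys; infer_instance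
def pvWitness_group_annex_keys : (List (List (String × String))) := [[("path", "ab/cd.log")]]

def Spec_group_annex_keys (entries : List (List (String × String))) (out : List (String × List (String × String))) : Prop := out = group_annex_keys_alt entries
instance (entries : List (List (String × String))) (out : List (String × List (String × String))) : Decidable (Spec_group_annex_keys entries out) := by unfold Spec_group_annex_keys; infer_instance

-- ===== CLAIM (what is proved, stated in full; the proofs are below) =====
def Claim_equal_group_annex_keys : Prop := ∀ (entries : List (List (String × String))), Dom_group_annex_keys entries → Pre_group_annex_keys entries → Spec_group_annex_keys entries (group_annex_keys entries)

-- ===== LEMMAS AND PROOFS =====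

-- a string key equals the length-n tail slice of p iff it has length n and is a suffix of p
-- (p containing '/' and the key not rules out the corner where the slice is all of a short p)
theorem key_eq_slice_iff (p key : String) (n : Nat) (hn : 0 < n)
    (hp : '/' ∈ p.toList) (hk : '/' ∉ key.toList) :
    key = PySem.Str.slice p (some (-(n : Int))) none ↔
      key.toList.length = n ∧ key.toList <:+ p.toList := by
  have hs : (PySem.Str.slice p (some (-(n : Int))) none).toList
      = p.toList.drop (p.toList.length - n) := by
    simp only [PySem.Str.toList_slice]
    simp [PySem.List.slice_from_neg_natCast p.toList n hn]
  constructor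
  · intro h
    have h' : key.toList = p.toList.drop (p.toList.length - n) := by rw [h, hs]
    by_cases hle : n ≤ p.toList.length
    · have hlen : key.toList.length = n := by
        rw [h', List.length_drop]; omega
      refine ⟨hlen, List.suffix_iff_eq_drop.mpr ?_⟩
      rw [hlen, h']
    · exfalso
      have h0 : p.toList.length - n = 0 := by omega
      rw [h0, List.drop_zero] at h'
      exact hk (h' ▸ hp)
  · rintro ⟨hlen, hsuf⟩
    have h' := List.suffix_iff_eq_drop.mp hsuf
    rw [hlen] at h'
    exact String.toList_injective (by rw [hs, ← h'])

theorem key_eq_slice_beq (p key : String) (n : Nat) (hn : 0 < n)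
    (hp : '/' ∈ p.toList) (hk : '/' ∉ key.toList) (hlen : key.toList.length = n) :
    (key == PySem.Str.slice p (some (-(n : Int))) none) = PySem.Str.endswith p key := by
  rw [Bool.eq_iff_iff, beq_iff_eq, key_eq_slice_iff p key n hn hp hk,
    PySem.Str.endswith_eq, PySem.Chars.endswith_iff]
  exact ⟨fun h => h.2, fun h => ⟨hlen, h⟩⟩

theorem key_ne_slice (p key : String) (n : Nat) (hn : 0 < n)
    (hp : '/' ∈ p.toList) (hk : '/' ∉ key.toList) (hlen : key.toList.length ≠ n) :
    (key == PySem.Str.slice p (some (-(n : Int))) none) = false := by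
  rw [Bool.eq_false_iff]
  intro h
  exact hlen ((key_eq_slice_iff p key n hn hp hk).mp (beq_iff_eq.mp h)).1

-- B's tail-slice table lookup computes (A's key_stem, A's ladder label) on slash-containing paths
theorem classify_eq (p : String) (hp : PySem.Str.isIn "/" p = true) :
    pvClassify p =
      (key_stem p,
        if PySem.Str.endswith p ".log.rmet" then "rmet"
        else if PySem.Str.endswith p ".log.web" then "web"
        else if PySem.Str.endswith p ".log.cnk" then "cnk"
        else if PySem.Str.endswith p ".log" then "log"
        else "other") := by
  have hpm : '/' ∈ p.toList := by
    have h2 : ("/" : String).toList <:+: p.toList :=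
      (PySem.Chars.isIn_iff_infix _ _).mp (by simpa using hp)
    exact h2.subset (by decide)
  simp only [pvClassify, classifyGo, pvLabels, PySem.Dict.get?_mk_cons,
    key_eq_slice_beq p ".log.rmet" 9 (by norm_num) hpm (by decide) (by decide),
    key_ne_slice p ".log.web" 9 (by norm_num) hpm (by decide) (by decide),
    key_ne_slice p ".log.cnk" 9 (by norm_num) hpm (by decide) (by decide),
    key_ne_slice p ".log" 9 (by norm_num) hpm (by decide) (by decide),
    key_ne_slice p ".log.rmet" 8 (by norm_num) hpm (by decide) (by decide),
    key_eq_slice_beq p ".log.web" 8 (by norm_num) hpm (by decide) (by decide),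
    key_eq_slice_beq p ".log.cnk" 8 (by norm_num) hpm (by decide) (by decide),
    key_ne_slice p ".log" 8 (by norm_num) hpm (by decide) (by decide),
    key_ne_slice p ".log.rmet" 4 (by norm_num) hpm (by decide) (by decide),
    key_ne_slice p ".log.web" 4 (by norm_num) hpm (by decide) (by decide),
    key_ne_slice p ".log.cnk" 4 (by norm_num) hpm (by decide) (by decide),
    key_eq_slice_beq p ".log" 4 (by norm_num) hpm (by decide) (by decide),
    if_false, Bool.false_eq_true]
  simp only [key_stem, keyStemGo]
  split_ifs <;> simp_all <;> rfl

-- the per-stem content of A's accumulating fold is the fold over the stem's filtered triples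
theorem getD_group (ts : List (String × String × String))
    (g : PySem.Dict String (PySem.Dict String String)) (s : String) :
    (ts.foldl (fun g t => g.insert t.1 ((g.getD t.1 PySem.Dict.empty).insert t.2.1 t.2.2)) g).getD s PySem.Dict.empty
      = (ts.filter (fun t => t.1 == s)).foldl
          (fun (inner : PySem.Dict String String) t => inner.insert t.2.1 t.2.2)
          (g.getD s PySem.Dict.empty) := by
  induction ts generalizing g with
  | nil => rfl
  | cons t rest ih =>
    by_cases h : t.1 = s
    · subst h
      rw [List.foldl_cons, List.filter_cons, if_pos (by simp), List.foldl_cons, ih,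
        PySem.Dict.getD_insert, if_pos rfl]
    · have hb : (t.1 == s) = false := by simpa using fun hc : t.1 = s => h hc
      have hc : ¬ (s = t.1) := fun hc => h hc.symm
      rw [List.foldl_cons, List.filter_cons, hb, if_neg (by simp), ih,
        PySem.Dict.getD_insert, if_neg hc]

-- A's per-entry step, rewritten through B's classification of the path
theorem stepA_eq (g : PySem.Dict String (PySem.Dict String String)) (e : List (String × String)) :
    (match (PySem.Dict.mk e).get? "path" with
      | none => g
      | some path =>
        if PySem.Str.isIn "/" path then
          let stem := key_stem path
          let inner := g.getD stem PySem.Dict.empty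
          if PySem.Str.endswith path ".log.rmet" then g.insert stem (inner.insert "rmet" path)
          else if PySem.Str.endswith path ".log.web" then g.insert stem (inner.insert "web" path)
          else if PySem.Str.endswith path ".log.cnk" then g.insert stem (inner.insert "cnk" path)
          else if PySem.Str.endswith path ".log" then g.insert stem (inner.insert "log" path)
          else g.insert stem (inner.insert "other" path)
        else g) =
    (match (match (PySem.Dict.mk e).get? "path" with
      | none => none
      | some path =>
        if PySem.Str.isIn "/" path then
          some ((pvClassify path).1, (pvClassify path).2, path)
        else none) with
      | some t => g.insert t.1 ((g.getD t.1 PySem.Dict.empty).insert t.2.1 t.2.2)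
      | none => g) := by
  cases hq : (PySem.Dict.mk e).get? "path" with
  | none => rfl
  | some path =>
    by_cases hsl : PySem.Str.isIn "/" path = true
    · simp only [hsl, if_pos, classify_eq path hsl]
      split_ifs <;> rfl
    · simp only [Bool.not_eq_true] at hsl
      simp only [hsl, Bool.false_eq_true, if_false]

-- A's entry loop is the triple loop over the classified, slash-filtered entries
-- (the library List.foldl_filterMap is not syntactically usable here: its matcher
-- constant differs from the port's, so this concrete instance is proved directly)
theorem foldA_eq (entries : List (List (String × String)))
    (g : PySem.Dict String (PySem.Dict String String)) :
    entries.foldl (fun g e =>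
      (match (match (PySem.Dict.mk e).get? "path" with
        | none => none
        | some path =>
          if PySem.Str.isIn "/" path then
            some ((pvClassify path).1, (pvClassify path).2, path)
          else none) with
        | some t => g.insert t.1 ((g.getD t.1 PySem.Dict.empty).insert t.2.1 t.2.2)
        | none => g)) g
      = (entries.filterMap (fun e =>
          match (PySem.Dict.mk e).get? "path" with
          | none => none
          | some path =>
            if PySem.Str.isIn "/" path then
              some ((pvClassify path).1, (pvClassify path).2, path)
            else none)).foldl
          (fun g t => g.insert t.1 ((g.getD t.1 PySem.Dict.empty).insert t.2.1 t.2.2)) g := by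
  induction entries generalizing g with
  | nil => rfl
  | cons e rest ih =>
    rw [List.foldl_cons, List.filterMap_cons]
    cases hq : (match (PySem.Dict.mk e).get? "path" with
      | none => none
      | some path =>
        if PySem.Str.isIn "/" path then
          some ((pvClassify path).1, (pvClassify path).2, path)
        else none) with
    | none => exact ih _
    | some t => rw [List.foldl_cons]; exact ih _

-- the grouping itself, over an arbitrary list of (stem, label, path) triples:
-- A's accumulating nested-dict fold produces the same items as B's staged build
theorem fold_items_eq (ts : List (String × String × String)) :
    ((ts.foldl (fun g t => g.insert t.1 ((g.getD t.1 PySem.Dict.empty).insert t.2.1 t.2.2))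
        (PySem.Dict.empty : PySem.Dict String (PySem.Dict String String))).items).map
      (fun kv => (kv.1, kv.2.items)) =
    ((PySem.List.dedup (ts.map (fun t => t.1))).foldl (fun d s =>
        d.insert s ((ts.filter (fun t => t.1 == s)).foldl
          (fun (inner : PySem.Dict String String) t => inner.insert t.2.1 t.2.2) PySem.Dict.empty))
      (PySem.Dict.empty : PySem.Dict String (PySem.Dict String String))).items.map
      (fun kv => (kv.1, kv.2.items)) := by
  have hnd : (ts.foldl (fun g t => g.insert t.1 ((g.getD t.1 PySem.Dict.empty).insert t.2.1 t.2.2))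
      (PySem.Dict.empty : PySem.Dict String (PySem.Dict String String))).keys.Nodup :=
    PySem.Dict.nodup_keys_foldl_insert_key ts (fun t => t.1) _ _ (by simp [PySem.Dict.keys_empty])
  have hkeys : (ts.foldl (fun g t => g.insert t.1 ((g.getD t.1 PySem.Dict.empty).insert t.2.1 t.2.2))
      (PySem.Dict.empty : PySem.Dict String (PySem.Dict String String))).keys
      = PySem.List.dedup (ts.map (fun t => t.1)) := by
    rw [PySem.Dict.keys_foldl_insert_key ts (fun t => t.1) _ _, PySem.Dict.keys_empty]
    rfl
  rw [PySem.Dict.items_eq_map_keys _ hnd PySem.Dict.empty, hkeys,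
    PySem.Dict.items_foldl_insert_fresh _ (fun s => s) _ _
      (fun a _ => PySem.Dict.contains_empty a)
      (by rw [List.map_id']; exact PySem.List.nodup_dedup _)]
  rw [show (PySem.Dict.empty : PySem.Dict String (PySem.Dict String String)).items = [] from rfl]
  simp only [List.nil_append, List.map_map]
  refine List.map_congr_left (fun s _ => ?_)
  simp only [Function.comp_apply]
  rw [getD_group, PySem.Dict.getD_empty]

-- ===== VERDICT (by name: the statement is the Claim_ definition above) =====
theorem group_annex_keys_spec : Claim_equal_group_annex_keys := by
  intro entries _ _
  unfold Spec_group_annex_keys group_annex_keys group_annex_keys_alt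
  show ((entries.foldl (fun g entry =>
      match (PySem.Dict.mk entry).get? "path" with
      | none => g
      | some path =>
        if PySem.Str.isIn "/" path then
          let stem := key_stem path
          let inner := g.getD stem PySem.Dict.empty
          if PySem.Str.endswith path ".log.rmet" then g.insert stem (inner.insert "rmet" path)
          else if PySem.Str.endswith path ".log.web" then g.insert stem (inner.insert "web" path)
          else if PySem.Str.endswith path ".log.cnk" then g.insert stem (inner.insert "cnk" path)
          else if PySem.Str.endswith path ".log" then g.insert stem (inner.insert "log" path)
          else g.insert stem (inner.insert "other" path)
        else g) PySem.Dict.empty).items).map (fun kv => (kv.1, kv.2.items)) = _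
  rw [List.foldl_ext _ (fun g e =>
      (match (match (PySem.Dict.mk e).get? "path" with
        | none => none
        | some path =>
          if PySem.Str.isIn "/" path then
            some ((pvClassify path).1, (pvClassify path).2, path)
          else none) with
        | some t => g.insert t.1 ((g.getD t.1 PySem.Dict.empty).insert t.2.1 t.2.2)
        | none => g))
      PySem.Dict.empty (fun g e _ => stepA_eq g e)]
  rw [foldA_eq]
  exact fold_items_eq _
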